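-- pv_equiv track=rewrite | github.com/WhissleAI/meta-asr | organise-data/remove_multiple_ner.py | clean_ner_tags
-- ===== SOURCE A (Python) =====
-- def clean_ner_tags(text):
--     words = text.split()
--     cleaned_words = []
--     seen_tags = set()
--
--     for word in words:
--         if word.startswith("NER_") or word == "END":
--             if word not in seen_tags:
--                 seen_tags.add(word)
--                 cleaned_words.append(word)
--         else:
--             cleaned_words.append(word)
--             seen_tags.clear()  # Reset tags after non-NER word
--
--     return ' '.join(cleaned_words)
-- ===== SOURCE B (Python) =====
-- def _is_tag(w):
--     return w.startswith("NER_") or w == "END"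
--
--
-- def _dup_before(words, i):
--     # is words[i] a repeat of a tag word in the tag run immediately preceding it?
--     w = words[i]
--     j = i - 1
--     while j >= 0 and _is_tag(words[j]):
--         if words[j] == w:
--             return True
--         j -= 1
--     return False
--
--
-- def clean_ner_tags(text):
--     words = text.split()
--     return ' '.join(w for i, w in enumerate(words)
--                     if not _is_tag(w) or not _dup_before(words, i))
-- ===== Notes on version B (the rewrite author's own statement) =====
-- stated objective: alternative
-- what changed: B drops A's stateful accumulator loop with a mutable seen-set that is cleared on resets; instead it is a stateless index-based filter: a word is kept unless a backward scan through the tag words immediately preceding it finds the same word, so no running state is maintained at all.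
import Mathlib
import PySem

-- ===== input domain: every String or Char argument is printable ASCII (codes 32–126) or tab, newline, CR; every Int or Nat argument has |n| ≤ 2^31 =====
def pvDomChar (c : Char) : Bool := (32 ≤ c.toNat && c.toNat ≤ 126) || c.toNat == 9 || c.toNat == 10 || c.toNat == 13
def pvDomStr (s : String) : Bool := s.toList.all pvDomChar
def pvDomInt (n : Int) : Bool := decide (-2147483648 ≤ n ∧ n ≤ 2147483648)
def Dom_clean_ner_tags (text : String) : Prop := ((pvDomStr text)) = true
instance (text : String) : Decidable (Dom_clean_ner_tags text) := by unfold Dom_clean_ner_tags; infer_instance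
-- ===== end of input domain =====

-- B replaces A's stateful seen-set-with-reset loop by a stateless per-index filter that
-- looks backward through the preceding tag run; same return value (objective: alternative).

-- ===== PORT A =====
-- the predicate `word.startswith("NER_") or word == "END"`
def pvIsTag (w : String) : Bool := PySem.Str.startswith w "NER_" || w == "END"

-- A's for-loop over words, state = (cleaned_words, seen_tags)
def aLoop : List String → List String → PySem.Set String → List String
  | [], cleaned, _ => cleaned
  | w :: ws, cleaned, seen =>
    if pvIsTag w then
      if PySem.Set.contains seen w then aLoop ws cleaned seen
      else aLoop ws (cleaned ++ [w]) (PySem.Set.add seen w)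
    else aLoop ws (cleaned ++ [w]) PySem.Set.empty

def clean_ner_tags (text : String) : String :=
  PySem.Str.join " " (aLoop (PySem.Str.split₀ text) [] PySem.Set.empty)

-- ===== PORT B =====
-- B's backward while-loop `j = i-1; while j >= 0 and _is_tag(words[j]): …; j -= 1`,
-- written as structural recursion on the (nonnegative) index: argument i is the index
-- AFTER the position being scanned, so the scan visits i-1, i-2, … and stops at 0.
def dupBefore (words : List String) (w : String) : Nat → Bool
  | 0 => false
  | i + 1 =>
    let wj := words.getD i ""
    if pvIsTag wj then
      if wj == w then true else dupBefore words w i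
    else false

-- the generator `w for i, w in enumerate(words) if not _is_tag(w) or not _dup_before(words, i)`
-- (enumerate yields Int indices, always ≥ 0 here, so `.toNat` is exact)
def clean_ner_tags_alt (text : String) : String :=
  let words := PySem.Str.split₀ text
  PySem.Str.join " "
    ((PySem.List.enumerate words).filterMap
      (fun p => if !(pvIsTag p.2) || !(dupBefore words p.2 p.1.toNat) then some p.2 else none))

-- ===== PRECONDITION & SPEC =====
def Spec_clean_ner_tags (text : String) (out : String) : Prop := out = clean_ner_tags_alt text
instance (text : String) (out : String) : Decidable (Spec_clean_ner_tags text out) := by unfold Spec_clean_ner_tags; infer_instance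

-- ===== CLAIM (what is proved, stated in full; the proofs are below) =====
def Claim_equal_clean_ner_tags : Prop := ∀ (text : String), Dom_clean_ner_tags text → Spec_clean_ner_tags text (clean_ner_tags text)

-- ===== LEMMAS AND PROOFS =====

theorem contains_add (S : PySem.Set String) (w w' : String) :
    PySem.Set.contains (PySem.Set.add S w) w' = (PySem.Set.contains S w' || decide (w' = w)) := by
  by_cases hc : PySem.Set.contains S w = true
  · have hm : w ∈ S := by simpa [PySem.Set.contains] using hc
    by_cases he : w' = w
    · subst he; simp [PySem.Set.add, hm, PySem.Set.contains]
    · simp [PySem.Set.add, hm, he]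
  · have hm : w ∉ S := by simpa [PySem.Set.contains] using hc
    simp [PySem.Set.add, hm, PySem.Set.contains]

-- the one fact relating A's state to B's backward scan: along the traversal, membership in
-- A's seen-set at index i coincides with B's `_dup_before(words, i)`
theorem aLoop_eq_filter (words : List String) :
    ∀ (ws : List String) (i : Nat) (S : PySem.Set String) (cleaned : List String),
      words.drop i = ws →
      (∀ w, PySem.Set.contains S w = dupBefore words w i) →
      aLoop ws cleaned S =
        cleaned ++ (PySem.List.enumerate ws (i : Int)).filterMap
          (fun p => if !(pvIsTag p.2) || !(dupBefore words p.2 p.1.toNat) then some p.2 else none) := by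
  intro ws
  induction ws with
  | nil => intro i S cleaned _ _; simp [aLoop, PySem.List.enumerate_nil]
  | cons w ws ih =>
    intro i S cleaned hdrop hinv
    have hget : words[i]? = some w := by
      have : (words.drop i)[0]? = some w := by rw [hdrop]; rfl
      simpa using this
    have hgetD : words[i]?.getD "" = w := by simp [hget]
    have hdrop' : words.drop (i + 1) = ws := by
      have h1 := congrArg (List.drop 1) hdrop
      rw [List.drop_drop] at h1
      simpa using h1
    have hcast : ((i : Int) + 1) = ((i + 1 : Nat) : Int) := by push_cast; ring
    rw [PySem.List.enumerate_cons, hcast]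
    by_cases hk : pvIsTag w = true
    · by_cases hc : PySem.Set.contains S w = true
      · -- duplicate within the run: A skips, B's filter drops it
        have hdup : dupBefore words w i = true := by rw [← hinv]; exact hc
        have hinv' : ∀ w', PySem.Set.contains S w' = dupBefore words w' (i + 1) := by
          intro w'
          by_cases he : w' = w
          · subst he
            rw [hc]
            simp [dupBefore, hgetD, hk]
          · have hne : (w == w') = false := beq_eq_false_iff_ne.mpr (fun h => he h.symm)
            rw [hinv w']
            simp [dupBefore, hgetD, hk, hne]
        rw [aLoop]
        simp only [hk, hc, if_true]
        rw [ih (i + 1) S cleaned hdrop' hinv']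
        simp [hk, Int.toNat_natCast, hdup]
      · -- first occurrence in the run: A appends and records, B keeps it
        have hdup : dupBefore words w i = false := by rw [← hinv]; simpa using hc
        have hinv' : ∀ w', PySem.Set.contains (PySem.Set.add S w) w' = dupBefore words w' (i + 1) := by
          intro w'
          rw [contains_add]
          by_cases he : w' = w
          · subst he; simp [dupBefore, hgetD, hk]
          · have hne : (w == w') = false := beq_eq_false_iff_ne.mpr (fun h => he h.symm)
            rw [hinv w']
            simp [dupBefore, hgetD, hk, hne, he]
        rw [aLoop]
        simp only [hk, hc, Bool.false_eq_true, if_false, if_true]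
        rw [ih (i + 1) (PySem.Set.add S w) (cleaned ++ [w]) hdrop' hinv']
        simp [hk, Int.toNat_natCast, hdup]
    · -- non-tag word: A appends and resets, B keeps it; scans past i now stop here
      have hkf : pvIsTag w = false := by simpa using hk
      have hinv' : ∀ w', PySem.Set.contains PySem.Set.empty w' = dupBefore words w' (i + 1) := by
        intro w'
        simp [dupBefore, hgetD, hkf, PySem.Set.contains, PySem.Set.empty]
      rw [aLoop]
      simp only [hkf, Bool.false_eq_true, if_false]
      rw [ih (i + 1) PySem.Set.empty (cleaned ++ [w]) hdrop' hinv']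
      simp [hkf]

-- ===== VERDICT (by name: the statement is the Claim_ definition above) =====
theorem clean_ner_tags_spec : Claim_equal_clean_ner_tags := by
  intro text _
  unfold Spec_clean_ner_tags clean_ner_tags clean_ner_tags_alt
  have h := aLoop_eq_filter (PySem.Str.split₀ text) (PySem.Str.split₀ text) 0
      PySem.Set.empty [] (by simp) (fun w => rfl)
  simp only [Nat.cast_zero] at h
  rw [h]
  rfl
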